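-- pv_equiv track=rewrite | github.com/jatinjaglan18/p_for_python | 10_DP/9.py | coin_change_permutations
-- ===== SOURCE A (Python) =====
-- def coin_change_permutations(coins,tar):
--     dp = [0 for i in range(tar+1)]
--     dp[0] = 1
--     for i in range(1,len(dp),1):
--         for coin in coins:
--             if coin <= i:
--                 dp[i] = dp[i] + dp[i-coin]
--     return dp[tar]
-- ===== SOURCE B (Python) =====
-- def coin_change_permutations(coins, tar):
--     memo = {}
--
--     def helper(rem):
--         if rem == 0:
--             return 1
--         if rem in memo:
--             return memo[rem]
--         total = 0
--         for c in coins: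
--             if c <= rem:
--                 total += helper(rem - c)
--         memo[rem] = total
--         return total
--
--     return helper(tar)
-- ===== Notes on version B (the rewrite author's own statement) =====
-- stated objective: alternative
-- what changed: Bottom-up DP table over amounts 1..tar replaced by a top-down memoized recursion helper(rem) that fills only the subproblems reachable from tar, on demand (measurably faster when coins are large relative to tar).
-- outside the precondition, e.g. on coin_change_permutations([0, 2], 2): A returns 1, B raises RecursionError
import Mathlib
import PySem

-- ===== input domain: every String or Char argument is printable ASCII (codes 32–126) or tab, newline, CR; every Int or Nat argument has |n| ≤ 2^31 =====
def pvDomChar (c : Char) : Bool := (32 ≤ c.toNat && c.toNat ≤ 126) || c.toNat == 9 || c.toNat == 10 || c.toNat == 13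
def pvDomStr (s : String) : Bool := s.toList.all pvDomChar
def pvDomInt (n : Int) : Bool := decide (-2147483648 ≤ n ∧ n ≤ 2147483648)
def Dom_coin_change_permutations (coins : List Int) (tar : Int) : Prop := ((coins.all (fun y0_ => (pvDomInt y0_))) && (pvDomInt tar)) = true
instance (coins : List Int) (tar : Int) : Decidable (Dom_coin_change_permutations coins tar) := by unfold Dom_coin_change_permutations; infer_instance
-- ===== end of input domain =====

-- B replaces A's bottom-up DP table with a top-down memoized recursion (alternative decomposition, same cost).

-- ===== PORT A =====
-- literal transliteration of A: dp table over 0..tar, dp[0]=1, then for i in 1..len(dp)-1 add dp[i-coin]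
def coin_change_permutations (coins : List Int) (tar : Int) : Int :=
  let dp0 := (PySem.List.pyRange 0 (tar + 1) 1).map (fun _ => (0 : Int))
  let dp1 := PySem.List.pySetD dp0 0 1
  let dp2 := (PySem.List.pyRange 1 (dp1.length : Int) 1).foldl (fun dp i =>
      coins.foldl (fun dp coin =>
        if coin ≤ i then
          PySem.List.pySetD dp i (PySem.List.pyGetD dp i 0 + PySem.List.pyGetD dp (i - coin) 0)
        else dp) dp) dp1
  PySem.List.pyGetD dp2 tar 0

-- ===== PORT B =====
-- helper(rem) of Source B, memo threaded explicitly; fuel bounds the recursion depth (tar.toNat + 1 is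
-- always enough under Pre_, where every coin is ≥ 1, so each call strictly decreases rem)
def ccpHelper (coins : List Int) : Nat → PySem.Dict Int Int → Int → Int × PySem.Dict Int Int
  | 0, memo, rem => if rem = 0 then (1, memo) else (0, memo)
  | fuel + 1, memo, rem =>
    if rem = 0 then (1, memo)
    else
      match memo.get? rem with
      | some v => (v, memo)
      | none =>
        let p := coins.foldl (fun (acc : Int × PySem.Dict Int Int) c =>
            if c ≤ rem then
              let q := ccpHelper coins fuel acc.2 (rem - c)
              (acc.1 + q.1, q.2)
            else acc) (0, memo)
        (p.1, p.2.insert rem p.1)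

def coin_change_permutations_alt (coins : List Int) (tar : Int) : Int :=
  (ccpHelper coins (tar.toNat + 1) PySem.Dict.empty tar).1

-- ===== PRECONDITION & SPEC =====
-- Pre_ excludes targets ≥ 1 with a non-positive coin: a negative coin makes A raise IndexError
-- (dp[i-coin] past the end), and a zero coin makes B's recursion not terminate while A returns a value.
def Pre_coin_change_permutations (coins : List Int) (tar : Int) : Prop :=
  0 ≤ tar ∧ (tar = 0 ∨ ∀ c ∈ coins, 1 ≤ c)
instance (coins : List Int) (tar : Int) : Decidable (Pre_coin_change_permutations coins tar) := by
  unfold Pre_coin_change_permutations; infer_instance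

def pvWitness_coin_change_permutations : List Int × Int := ([1, 2], 4)

def Spec_coin_change_permutations (coins : List Int) (tar : Int) (out : Int) : Prop := out = coin_change_permutations_alt coins tar
instance (coins : List Int) (tar : Int) (out : Int) : Decidable (Spec_coin_change_permutations coins tar out) := by unfold Spec_coin_change_permutations; infer_instance

-- ===== CLAIM (what is proved, stated in full; the proofs are below) =====
def Claim_equal_coin_change_permutations : Prop := ∀ (coins : List Int) (tar : Int), Dom_coin_change_permutations coins tar → Pre_coin_change_permutations coins tar → Spec_coin_change_permutations coins tar (coin_change_permutations coins tar)

-- ===== LEMMAS AND PROOFS =====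

-- the mathematical recurrence both programs compute: f 0 = 1, f n = Σ_{c ∈ coins, 1 ≤ c ≤ n} f (n - c)
def ccpSpec (coins : List Int) (n : Nat) : Int :=
  if _hn : n = 0 then 1
  else coins.foldl (fun acc c =>
      acc + (if _hc : 1 ≤ c ∧ c ≤ (n : Int) then ccpSpec coins (n - c.toNat) else 0)) 0
termination_by n
decreasing_by omega

lemma ccpSpec_zero (coins : List Int) : ccpSpec coins 0 = 1 := by
  rw [ccpSpec]; simp

lemma ccpSpec_succ (coins : List Int) (n : Nat) (hn : n ≠ 0) :
    ccpSpec coins n = coins.foldl (fun acc c =>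
      acc + (if 1 ≤ c ∧ c ≤ (n : Int) then ccpSpec coins (n - c.toNat) else 0)) 0 := by
  rw [ccpSpec]
  simp [hn]

-- shift the accumulator of an additive foldl
lemma foldl_add_shift (g : Int → Int) (l : List Int) (a : Int) :
    l.foldl (fun x c => x + g c) a = a + l.foldl (fun x c => x + g c) 0 := by
  induction l generalizing a with
  | nil => simp
  | cons c l ih => simp only [List.foldl_cons]; rw [ih, ih (0 + g c)]; ring

-- congruence of an additive foldl under a pointwise-on-members equality
lemma foldl_add_congr (g g' : Int → Int) (l : List Int) (h : ∀ c ∈ l, g c = g' c) :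
    l.foldl (fun x c => x + g c) 0 = l.foldl (fun x c => x + g' c) 0 := by
  induction l with
  | nil => rfl
  | cons c l ih =>
    simp only [List.foldl_cons]
    rw [foldl_add_shift g, foldl_add_shift g', h c (by simp),
        ih (fun c hc => h c (List.mem_cons_of_mem _ hc))]

lemma foldl_add_cons (g : Int → Int) (l : List Int) (a b : Int) :
    a + b + l.foldl (fun x c => x + g c) 0 = a + l.foldl (fun x c => x + g c) (0 + b) := by
  rw [foldl_add_shift g l (0 + b)]; ring

def GoodMemo (coins : List Int) (m : PySem.Dict Int Int) : Prop :=
  ∀ k v, m.get? k = some v → v = ccpSpec coins k.toNat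

lemma goodMemo_empty (coins : List Int) : GoodMemo coins PySem.Dict.empty := by
  intro k v h
  simp [PySem.Dict.empty, PySem.Dict.get?] at h

-- correctness of the memoized helper
lemma ccpHelper_correct (coins : List Int) (hcoins : ∀ c ∈ coins, 1 ≤ c) :
    ∀ (fuel : Nat) (rem : Int) (memo : PySem.Dict Int Int), 0 ≤ rem → rem.toNat < fuel →
      GoodMemo coins memo →
      (ccpHelper coins fuel memo rem).1 = ccpSpec coins rem.toNat ∧
      GoodMemo coins (ccpHelper coins fuel memo rem).2 := by
  intro fuel
  induction fuel with
  | zero => intro rem memo _ h _; omega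
  | succ fuel ih =>
    intro rem memo hrem hfuel hmemo
    by_cases h0 : rem = 0
    · subst h0
      simp [ccpHelper, ccpSpec_zero, hmemo]
    · have hrem1 : 1 ≤ rem := by omega
      rw [ccpHelper]
      simp only [if_neg h0]
      cases hget : memo.get? rem with
      | some v =>
        simpa using ⟨hmemo rem v hget, hmemo⟩
      | none =>
        simp only
        -- inner foldl invariant
        have inner : ∀ (l : List Int), (∀ c ∈ l, c ∈ coins) →
            ∀ (acc : Int) (m : PySem.Dict Int Int), GoodMemo coins m →
            (l.foldl (fun (acc : Int × PySem.Dict Int Int) c =>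
                if c ≤ rem then
                  let q := ccpHelper coins fuel acc.2 (rem - c)
                  (acc.1 + q.1, q.2)
                else acc) (acc, m)).1
              = acc + l.foldl (fun x c =>
                  x + (if c ≤ rem then ccpSpec coins (rem - c).toNat else 0)) 0 ∧
            GoodMemo coins (l.foldl (fun (acc : Int × PySem.Dict Int Int) c =>
                if c ≤ rem then
                  let q := ccpHelper coins fuel acc.2 (rem - c)
                  (acc.1 + q.1, q.2)
                else acc) (acc, m)).2 := by
          intro l
          induction l with
          | nil => intro _ acc m hm; simp [hm]
          | cons c l ihl =>
            intro hsub acc m hm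
            have hc1 : 1 ≤ c := hcoins c (hsub c (by simp))
            simp only [List.foldl_cons]
            by_cases hcr : c ≤ rem
            · have hrc0 : 0 ≤ rem - c := by omega
              have hrcf : (rem - c).toNat < fuel := by omega
              obtain ⟨hq1, hq2⟩ := ih (rem - c) m hrc0 hrcf hm
              obtain ⟨hr1, hr2⟩ := ihl (fun x hx => hsub x (List.mem_cons_of_mem _ hx))
                (acc + (ccpHelper coins fuel m (rem - c)).1) (ccpHelper coins fuel m (rem - c)).2 hq2
              simp only [if_pos hcr]
              refine ⟨?_, hr2⟩
              rw [hr1, hq1]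
              exact foldl_add_cons _ l acc (ccpSpec coins (rem - c).toNat)
            · obtain ⟨hr1, hr2⟩ := ihl (fun x hx => hsub x (List.mem_cons_of_mem _ hx)) acc m hm
              simp only [if_neg hcr]
              refine ⟨?_, hr2⟩
              rw [hr1]
              simpa using foldl_add_cons (fun c =>
                if c ≤ rem then ccpSpec coins (rem - c).toNat else 0) l acc 0
        obtain ⟨h1, h2⟩ := inner coins (fun _ h => h) 0 memo hmemo
        have hsum : coins.foldl (fun x c =>
            x + (if c ≤ rem then ccpSpec coins (rem - c).toNat else 0)) 0
            = ccpSpec coins rem.toNat := by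
          rw [ccpSpec_succ coins rem.toNat (by omega)]
          apply foldl_add_congr
          intro c hc
          have hc1 : 1 ≤ c := hcoins c hc
          by_cases hcr : c ≤ rem
          · have hcond : 1 ≤ c ∧ c ≤ ((rem.toNat : Nat) : Int) := by
              constructor <;> omega
            rw [if_pos hcr, if_pos hcond]
            congr 1
            omega
          · have hcond : ¬ (1 ≤ c ∧ c ≤ ((rem.toNat : Nat) : Int)) := by
              intro h; exact hcr (by omega)
            rw [if_neg hcr, if_neg hcond]
        constructor
        · simp only [h1, zero_add, hsum]
        · intro k v hkv
          rw [PySem.Dict.get?_insert] at hkv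
          by_cases hk : k = rem
          · subst hk
            simp at hkv
            rw [← hkv, h1, zero_add, hsum]
          · rw [if_neg hk] at hkv
            exact h2 k v hkv

-- B computes the recurrence
lemma alt_eq_spec (coins : List Int) (tar : Int) (h0 : 0 ≤ tar) (hcoins : ∀ c ∈ coins, 1 ≤ c) :
    coin_change_permutations_alt coins tar = ccpSpec coins tar.toNat := by
  exact (ccpHelper_correct coins hcoins (tar.toNat + 1) tar PySem.Dict.empty h0
    (by omega) (goodMemo_empty coins)).1

lemma alt_zero (coins : List Int) : coin_change_permutations_alt coins 0 = 1 := by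
  simp [coin_change_permutations_alt, ccpHelper]

-- reading / writing a table represented as a map over List.range
lemma pyGetD_map_range (N j : Nat) (f : Nat → Int) (h : j < N) :
    PySem.List.pyGetD ((List.range N).map f) (j : Int) 0 = f j := by
  rw [PySem.List.pyGetD_natCast]
  simp [List.getD, h]

lemma set_map_range (N i : Nat) (f : Nat → Int) (v : Int) :
    ((List.range N).map f).set i v = (List.range N).map (fun j => if j = i then v else f j) := by
  apply List.ext_getElem
  · simp
  · intro j hj hj'
    simp only [List.getElem_set, List.getElem_map, List.getElem_range]
    by_cases hji : i = j
    · subst hji; simp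
    · rw [if_neg hji, if_neg (fun h => hji h.symm)]

-- the table slice computed by A after the first k outer iterations
def ccpTab (coins : List Int) (k : Nat) : Nat → Int :=
  fun j => if j < k then ccpSpec coins j else 0

-- one outer iteration of A's loop advances the table from ccpTab i to ccpTab (i+1)
lemma innerLoop_step (coins : List Int) (hcoins : ∀ c ∈ coins, 1 ≤ c) (N i : Nat)
    (hi1 : 1 ≤ i) (hiN : i < N) :
    coins.foldl (fun dp coin =>
        if coin ≤ (i : Int) then
          PySem.List.pySetD dp (i : Int)
            (PySem.List.pyGetD dp (i : Int) 0 + PySem.List.pyGetD dp ((i : Int) - coin) 0)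
        else dp) ((List.range N).map (ccpTab coins i))
      = (List.range N).map (ccpTab coins (i + 1)) := by
  have inner : ∀ (l : List Int), (∀ c ∈ l, c ∈ coins) → ∀ (p : Int),
      l.foldl (fun dp coin =>
        if coin ≤ (i : Int) then
          PySem.List.pySetD dp (i : Int)
            (PySem.List.pyGetD dp (i : Int) 0 + PySem.List.pyGetD dp ((i : Int) - coin) 0)
        else dp)
        ((List.range N).map (fun j => if j = i then p else ccpTab coins i j))
      = (List.range N).map (fun j => if j = i then
          p + l.foldl (fun x c => x + (if c ≤ (i : Int) then ccpSpec coins (i - c.toNat) else 0)) 0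
        else ccpTab coins i j) := by
    intro l
    induction l with
    | nil => intro _ p; simp
    | cons c l ihl =>
      intro hsub p
      have hc1 : 1 ≤ c := hcoins c (hsub c (by simp))
      simp only [List.foldl_cons]
      by_cases hcr : c ≤ (i : Int)
      · have hread : PySem.List.pyGetD
            ((List.range N).map (fun j => if j = i then p else ccpTab coins i j)) (i : Int) 0 = p := by
          rw [pyGetD_map_range N i _ hiN]; simp
        have hic : (i : Int) - c = ((i - c.toNat : Nat) : Int) := by omega
        have hicN : i - c.toNat < N := by omega
        have hread2 : PySem.List.pyGetD
            ((List.range N).map (fun j => if j = i then p else ccpTab coins i j)) ((i : Int) - c) 0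
            = ccpSpec coins (i - c.toNat) := by
          rw [hic, pyGetD_map_range N (i - c.toNat) _ hicN]
          have hne : i - c.toNat ≠ i := by omega
          have hlt : i - c.toNat < i := by omega
          simp [hne, ccpTab, hlt]
        rw [if_pos hcr, hread, hread2, PySem.List.pySetD_natCast, set_map_range]
        have heq : (fun j => if j = i then p + ccpSpec coins (i - c.toNat)
              else if j = i then p else ccpTab coins i j)
            = (fun j => if j = i then p + ccpSpec coins (i - c.toNat) else ccpTab coins i j) := by
          funext j
          by_cases hji : j = i <;> simp [hji]
        rw [heq, ihl (fun x hx => hsub x (List.mem_cons_of_mem _ hx))]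
        congr 1
        funext j
        by_cases hji : j = i
        · simp only [hji, if_pos hcr]
          exact foldl_add_cons _ l p (ccpSpec coins (i - c.toNat))
        · simp [hji]
      · rw [if_neg hcr, ihl (fun x hx => hsub x (List.mem_cons_of_mem _ hx))]
        congr 1
        funext j
        by_cases hji : j = i
        · simp only [hji, if_neg hcr]
          simpa using foldl_add_cons (fun c =>
            if c ≤ (i : Int) then ccpSpec coins (i - c.toNat) else 0) l p 0
        · simp [hji]
  have hstart : (List.range N).map (ccpTab coins i)
      = (List.range N).map (fun j => if j = i then 0 else ccpTab coins i j) := by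
    congr 1
    funext j
    by_cases hji : j = i
    · simp [hji, ccpTab]
    · simp [hji]
  rw [hstart, inner coins (fun _ h => h) 0]
  congr 1
  funext j
  by_cases hji : j = i
  · have hsum : coins.foldl (fun x c =>
        x + (if c ≤ (i : Int) then ccpSpec coins (i - c.toNat) else 0)) 0 = ccpSpec coins i := by
      rw [ccpSpec_succ coins i (by omega)]
      apply foldl_add_congr
      intro c hc
      have hc1 : 1 ≤ c := hcoins c hc
      by_cases hcr : c ≤ (i : Int)
      · rw [if_pos hcr, if_pos ⟨hc1, hcr⟩]
      · rw [if_neg hcr, if_neg (fun h => hcr h.2)]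
    simp [hji, ccpTab, hsum]
  · simp only [hji, ccpTab]
    by_cases hlt : j < i
    · have : j < i + 1 := by omega
      simp [hlt, this]
    · have hne : ¬ j < i + 1 := by omega
      simp [hlt, hne]

-- A computes the recurrence (for tar ≥ 1 and positive coins)
lemma a_eq_spec (coins : List Int) (tar : Int) (h1 : 1 ≤ tar) (hcoins : ∀ c ∈ coins, 1 ≤ c) :
    coin_change_permutations coins tar = ccpSpec coins tar.toNat := by
  show PySem.List.pyGetD
      ((PySem.List.pyRange 1
          (((PySem.List.pySetD ((PySem.List.pyRange 0 (tar + 1) 1).map (fun _ => (0 : Int))) 0 1).length : Int)) 1).foldl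
        (fun dp i =>
          coins.foldl (fun dp coin =>
            if coin ≤ i then
              PySem.List.pySetD dp i (PySem.List.pyGetD dp i 0 + PySem.List.pyGetD dp (i - coin) 0)
            else dp) dp)
        (PySem.List.pySetD ((PySem.List.pyRange 0 (tar + 1) 1).map (fun _ => (0 : Int))) 0 1))
      tar 0 = ccpSpec coins tar.toNat
  have hN : (tar + 1).toNat = tar.toNat + 1 := by omega
  have hdp0 : (PySem.List.pyRange 0 (tar + 1) 1).map (fun _ => (0 : Int))
      = (List.range (tar.toNat + 1)).map (fun _ => (0 : Int)) := by
    rw [PySem.List.pyRange_one]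
    simp [hN, Function.comp_def]
  have hdp1 : PySem.List.pySetD ((PySem.List.pyRange 0 (tar + 1) 1).map (fun _ => (0 : Int))) 0 1
      = (List.range (tar.toNat + 1)).map (ccpTab coins 1) := by
    rw [hdp0, PySem.List.pySetD_of_nonneg _ _ le_rfl]
    have h00 : ((0 : Int)).toNat = 0 := rfl
    rw [h00, set_map_range]
    congr 1
    funext j
    by_cases hj : j = 0
    · simp [hj, ccpTab, ccpSpec_zero]
    · have : ¬ j < 1 := by omega
      simp [hj, ccpTab, this]
  rw [hdp1]
  have hlen : (((List.range (tar.toNat + 1)).map (ccpTab coins 1)).length : Int)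
      = ((tar.toNat : Int) + 1) := by simp
  rw [hlen]
  -- outer loop by induction on the number of processed amounts
  have outer : ∀ (k : Nat), k ≤ tar.toNat →
      (PySem.List.pyRange 1 (1 + (k : Int)) 1).foldl (fun dp i =>
        coins.foldl (fun dp coin =>
          if coin ≤ i then
            PySem.List.pySetD dp i (PySem.List.pyGetD dp i 0 + PySem.List.pyGetD dp (i - coin) 0)
          else dp) dp) ((List.range (tar.toNat + 1)).map (ccpTab coins 1))
      = (List.range (tar.toNat + 1)).map (ccpTab coins (k + 1)) := by
    intro k
    induction k with
    | zero => simp [PySem.List.pyRange_one_eq_nil]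
    | succ k ihk =>
      intro hk
      have hk' : k ≤ tar.toNat := by omega
      have hsplit : PySem.List.pyRange 1 (1 + ((k : Int) + 1)) 1
          = PySem.List.pyRange 1 (1 + (k : Int)) 1 ++ [1 + (k : Int)] := by
        have : (1 : Int) + ((k : Int) + 1) = (1 + (k : Int)) + 1 := by ring
        rw [this, PySem.List.pyRange_one_succ_right (by omega)]
      push_cast
      rw [hsplit, List.foldl_append, ihk hk']
      simp only [List.foldl_cons, List.foldl_nil]
      have hcast : (1 : Int) + (k : Int) = (((k + 1 : Nat)) : Int) := by push_cast; ring
      rw [hcast, innerLoop_step coins hcoins (tar.toNat + 1) (k + 1) (by omega) (by omega)]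
  have hbound : ((tar.toNat : Int) + 1) = 1 + ((tar.toNat : Int)) := by ring
  rw [hbound, outer tar.toNat (le_refl _)]
  rw [PySem.List.pyGetD_eq_getElem _ _ (by omega) (by simp only [List.length_map, List.length_range]; omega)]
  simp only [List.getElem_map, List.getElem_range]
  have : tar.toNat < tar.toNat + 1 := by omega
  simp [ccpTab, this]

lemma a_zero (coins : List Int) : coin_change_permutations coins 0 = 1 := by
  unfold coin_change_permutations
  have h : PySem.List.pyRange 0 (0 + 1) 1 = [0] := by
    rw [PySem.List.pyRange_one]; rfl
  rw [h]
  simp [PySem.List.pySetD, PySem.List.pySet?, PySem.List.pyGetD, PySem.List.pyGet?]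
  rfl

-- ===== VERDICT (by name: the statement is the Claim_ definition above) =====
theorem coin_change_permutations_spec : Claim_equal_coin_change_permutations := by
  intro coins tar _ hpre
  obtain ⟨h0, hcase⟩ := hpre
  unfold Spec_coin_change_permutations
  rcases hcase with h | hcoins
  · subst h
    rw [a_zero, alt_zero]
  · by_cases h1 : tar = 0
    · subst h1
      rw [a_zero, alt_zero]
    · rw [a_eq_spec coins tar (by omega) hcoins, alt_eq_spec coins tar h0 hcoins]
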